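-- pv_equiv track=rewrite | github.com/ssp4all/competitive-coding-algos | Interviews/robin-2021.py | diagonalsArranging
-- ===== SOURCE A (Python) =====
-- def diagonalsArranging(mat):
--     allStrings = []
--
--     n = len(mat)
--     for i in range(0, n):
--         r = n-1-i
--         c = 0
--         w = ""
--         for j in range(0, n):
--             w += mat[r][c]
--             r+= 1
--             c+= 1
--             if r == n:
--                 r = n-1-i
--                 c = 0
--         allStrings.append(w)
--
--     for i in range(1, n):
--         r = 0
--         c = i
--         w = ""
--         for j in range(0, n):
--             w += mat[r][c]
--             r+= 1
--             c+= 1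
--             if c == n:
--                 c = i
--                 r = 0
--         allStrings.append(w)
--     return [i[0]+1 for i in sorted(enumerate(allStrings), key=lambda x:x[1])]
-- ===== SOURCE B (Python) =====
-- def diagonalsArranging(mat):
--     n = len(mat)
--     allStrings = []
--     for i in range(0, n):
--         base = [mat[n-1-i+t][t] for t in range(i+1)]
--         allStrings.append("".join((base * n)[:n]))
--     for i in range(1, n):
--         base = [mat[t][i+t] for t in range(n-i)]
--         allStrings.append("".join((base * n)[:n]))
--     return [i[0]+1 for i in sorted(enumerate(allStrings), key=lambda x: x[1])]
-- ===== Notes on version B (the rewrite author's own statement) =====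
-- stated objective: alternative
-- what changed: A builds each wrapped-diagonal string with an inline (r,c) state machine that increments and resets wrap counters inside a length-n loop; B instead builds the short base diagonal by a direct comprehension, tiles it to n cells with (base * n)[:n], and joins, eliminating the mutable wrap state.
import Mathlib
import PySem

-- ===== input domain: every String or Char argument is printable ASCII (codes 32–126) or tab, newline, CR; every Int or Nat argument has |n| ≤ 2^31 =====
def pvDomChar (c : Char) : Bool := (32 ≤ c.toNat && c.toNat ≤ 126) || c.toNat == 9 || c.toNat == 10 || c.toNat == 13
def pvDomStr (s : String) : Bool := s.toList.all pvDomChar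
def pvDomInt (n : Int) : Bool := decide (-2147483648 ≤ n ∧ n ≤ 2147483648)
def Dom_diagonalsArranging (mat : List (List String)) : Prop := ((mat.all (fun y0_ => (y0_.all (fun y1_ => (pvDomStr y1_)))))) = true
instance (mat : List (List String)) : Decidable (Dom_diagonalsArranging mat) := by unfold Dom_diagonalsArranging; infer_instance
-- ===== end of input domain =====

-- B replaces A's inline wrap-counter state machine by a two-phase decomposition: build the short
-- base diagonal, tile it to length n ((base * n)[:n]), and join; objective 'alternative' (same cost).
-- Python strings are represented as List Char.

-- ===== PORT A =====
-- one pass of A's first inner loop body (state = (r, c, w)); reset when r reaches n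
def pvStep1 (mat : List (List String)) (n i : Int) (st : Int × Int × List Char) : Int × Int × List Char :=
  let w := st.2.2 ++ (PySem.List.pyGetD (PySem.List.pyGetD mat st.1 []) st.2.1 "").toList
  let r := st.1 + 1
  let c := st.2.1 + 1
  if r = n then (n - 1 - i, 0, w) else (r, c, w)

-- one pass of A's second inner loop body; reset when c reaches n
def pvStep2 (mat : List (List String)) (n i : Int) (st : Int × Int × List Char) : Int × Int × List Char :=
  let w := st.2.2 ++ (PySem.List.pyGetD (PySem.List.pyGetD mat st.1 []) st.2.1 "").toList
  let r := st.1 + 1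
  let c := st.2.1 + 1
  if c = n then (0, i, w) else (r, c, w)

def diagonalsArranging (mat : List (List String)) : List Int :=
  let n : Int := PySem.List.len mat
  let allStrings : List (List Char) :=
    (PySem.List.pyRange 0 n 1).foldl (fun acc i =>
      let st := (PySem.List.pyRange 0 n 1).foldl (fun st _ => pvStep1 mat n i st) (n - 1 - i, 0, [])
      acc ++ [st.2.2]) []
  let allStrings :=
    (PySem.List.pyRange 1 n 1).foldl (fun acc i =>
      let st := (PySem.List.pyRange 0 n 1).foldl (fun st _ => pvStep2 mat n i st) (0, i, [])
      acc ++ [st.2.2]) allStrings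
  (PySem.List.sorted (PySem.List.enumerate allStrings 0) (fun x => x.2) false).map (fun p => p.1 + 1)

-- ===== PORT B =====
-- base of the i-th lower wrapped diagonal: [mat[n-1-i+t][t] for t in range(i+1)]
def pvBase1 (mat : List (List String)) (n i : Int) : List String :=
  (PySem.List.pyRange 0 (i + 1) 1).map (fun t => PySem.List.pyGetD (PySem.List.pyGetD mat (n - 1 - i + t) []) t "")

-- base of the i-th upper wrapped diagonal: [mat[t][i+t] for t in range(n-i)]
def pvBase2 (mat : List (List String)) (n i : Int) : List String :=
  (PySem.List.pyRange 0 (n - i) 1).map (fun t => PySem.List.pyGetD (PySem.List.pyGetD mat t []) (i + t) "")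

-- "".join((base * n)[:n])  (list repetition, slice [:n] = take, join of the cells)
def pvTile (base : List String) (n : Int) : List Char :=
  ((((List.replicate n.toNat base).flatten).take n.toNat).map String.toList).flatten

def diagonalsArranging_alt (mat : List (List String)) : List Int :=
  let n : Int := PySem.List.len mat
  let lower : List (List Char) := (PySem.List.pyRange 0 n 1).map (fun i => pvTile (pvBase1 mat n i) n)
  let upper : List (List Char) := (PySem.List.pyRange 1 n 1).map (fun i => pvTile (pvBase2 mat n i) n)
  let order := PySem.List.sorted (PySem.List.enumerate (lower ++ upper) 0) (fun x => x.2) false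
  order.map (fun p => p.1 + 1)

-- ===== PRECONDITION & SPEC =====
-- Pre_: every row at least n cells long — exactly the inputs on which A returns (a shorter row
-- always gets read past its end by some diagonal, an IndexError in Python).
def Pre_diagonalsArranging (mat : List (List String)) : Prop :=
  ∀ row ∈ mat, mat.length ≤ row.length
instance (mat : List (List String)) : Decidable (Pre_diagonalsArranging mat) := by
  unfold Pre_diagonalsArranging; infer_instance

def pvWitness_diagonalsArranging : List (List String) := [["ab", "c"], ["", "x!"]]

def Spec_diagonalsArranging (mat : List (List String)) (out : List Int) : Prop := out = diagonalsArranging_alt mat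
instance (mat : List (List String)) (out : List Int) : Decidable (Spec_diagonalsArranging mat out) := by unfold Spec_diagonalsArranging; infer_instance

-- ===== CLAIM (what is proved, stated in full; the proofs are below) =====
def Claim_equal_diagonalsArranging : Prop := ∀ (mat : List (List String)), Dom_diagonalsArranging mat → Pre_diagonalsArranging mat → Spec_diagonalsArranging mat (diagonalsArranging mat)

-- ===== LEMMAS AND PROOFS =====

lemma pv_succ_mod (m p : Nat) (hp : 0 < p) :
    (m + 1) % p = if m % p + 1 = p then 0 else m % p + 1 := by
  rw [← Nat.mod_add_mod]
  split_ifs with h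
  · rw [h, Nat.mod_self]
  · exact Nat.mod_eq_of_lt (by have := Nat.mod_lt m hp; omega)

-- invariant of A's first inner loop: after m passes, (r, c) has wrapped to offset m % (I+1)
-- and w is the concatenation of the cells read so far
lemma pv_loop1 (mat : List (List String)) (N I : Nat) (m : Nat) :
    (List.range m).foldl (fun st _ => pvStep1 mat (N : Int) (I : Int) st) ((N : Int) - 1 - I, 0, []) =
      ((N : Int) - 1 - I + ((m % (I + 1) : Nat) : Int), ((m % (I + 1) : Nat) : Int),
       ((List.range m).map (fun j =>
         (PySem.List.pyGetD (PySem.List.pyGetD mat ((N : Int) - 1 - I + ((j % (I + 1) : Nat) : Int)) [])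
           ((j % (I + 1) : Nat) : Int) "").toList)).flatten) := by
  induction m with
  | zero => simp
  | succ m ih =>
    rw [List.range_succ, List.foldl_append, List.map_append, List.flatten_append, ih]
    have hm : m % (I + 1) < I + 1 := Nat.mod_lt m (by omega)
    simp only [pvStep1, List.foldl_cons, List.foldl_nil, List.map_cons, List.map_nil,
      List.flatten_cons, List.flatten_nil, List.append_nil]
    rw [pv_succ_mod m (I + 1) (by omega)]
    have hcond : ((N : Int) - 1 - (I : Int) + ((m % (I + 1) : Nat) : Int) + 1 = (N : Int)) ↔
        (m % (I + 1) + 1 = I + 1) := by constructor <;> (intro h; omega)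
    simp only [hcond]
    split_ifs with hc
    · refine congrArg₂ Prod.mk ?_ (congrArg₂ Prod.mk ?_ rfl) <;> (push_cast; try omega)
    · refine congrArg₂ Prod.mk ?_ (congrArg₂ Prod.mk ?_ rfl) <;> (push_cast; try omega)

-- invariant of A's second inner loop: after m passes, (r, c) = (m % (N-I), I + m % (N-I))
lemma pv_loop2 (mat : List (List String)) (N I : Nat) (hI : I < N) (m : Nat) :
    (List.range m).foldl (fun st _ => pvStep2 mat (N : Int) (I : Int) st) (0, (I : Int), []) =
      (((m % (N - I) : Nat) : Int), (I : Int) + ((m % (N - I) : Nat) : Int),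
       ((List.range m).map (fun j =>
         (PySem.List.pyGetD (PySem.List.pyGetD mat (((j % (N - I) : Nat) : Int)) [])
           ((I : Int) + ((j % (N - I) : Nat) : Int)) "").toList)).flatten) := by
  induction m with
  | zero => simp
  | succ m ih =>
    rw [List.range_succ, List.foldl_append, List.map_append, List.flatten_append, ih]
    have hm : m % (N - I) < N - I := Nat.mod_lt m (by omega)
    simp only [pvStep2, List.foldl_cons, List.foldl_nil, List.map_cons, List.map_nil,
      List.flatten_cons, List.flatten_nil, List.append_nil]
    rw [pv_succ_mod m (N - I) (by omega)]
    have hcond : ((I : Int) + ((m % (N - I) : Nat) : Int) + 1 = (N : Int)) ↔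
        (m % (N - I) + 1 = N - I) := by constructor <;> (intro h; omega)
    simp only [hcond]
    split_ifs with hc
    · refine congrArg₂ Prod.mk ?_ (congrArg₂ Prod.mk ?_ rfl) <;> (push_cast; try omega)
    · refine congrArg₂ Prod.mk ?_ (congrArg₂ Prod.mk ?_ rfl) <;> (push_cast; try omega)

-- (base * n)[:n] indexes the base cyclically
lemma pv_flatten_replicate_getElem? (base : List String) (P : Nat) (hP : base.length = P) :
    ∀ (N k : Nat), k < N * P →
    ((List.replicate N base).flatten)[k]? = base[k % P]? := by
  intro N
  induction N with
  | zero => intro k hk; omega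
  | succ N ih =>
    intro k hk
    have hk' : (N + 1) * P = N * P + P := by ring
    rw [List.replicate_succ, List.flatten_cons]
    by_cases hkP : k < P
    · rw [List.getElem?_append_left (by rw [hP]; exact hkP), Nat.mod_eq_of_lt hkP]
    · rw [List.getElem?_append_right (by rw [hP]; omega), hP, ih (k - P) (by omega)]
      conv_rhs => rw [Nat.mod_eq_sub_mod (by omega : k ≥ P)]

lemma pv_tile_eq (base : List String) (P n : Nat) (hP : base.length = P) (h0 : 0 < P) :
    ((List.replicate n base).flatten).take n = (List.range n).map (fun j => base.getD (j % P) "") := by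
  apply List.ext_getElem?
  intro k
  rw [List.getElem?_take]
  by_cases hk : k < n
  · rw [if_pos hk]
    have hn : n ≤ n * P := Nat.le_mul_of_pos_right n h0
    rw [pv_flatten_replicate_getElem? base P hP n k (by omega),
      List.getElem?_map, List.getElem?_range hk]
    have hlt : k % P < base.length := by rw [hP]; exact Nat.mod_lt _ h0
    simp [List.getD_eq_getElem?_getD, List.getElem?_eq_getElem hlt]
  · rw [if_neg hk, List.getElem?_map, List.getElem?_eq_none (by simpa using Nat.le_of_not_lt hk)]
    rfl

-- pvTile of a base of positive length P spells out as the cyclic concatenation of its cells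
lemma pv_tile_flatten (base : List String) (P : Nat) (hP : base.length = P) (h0 : 0 < P) (n : Nat) :
    pvTile base (n : Int) = ((List.range n).map (fun j => (base.getD (j % P) "").toList)).flatten := by
  unfold pvTile
  rw [Int.toNat_natCast, pv_tile_eq base P n hP h0, List.map_map]
  rfl

lemma pv_base1_getD (mat : List (List String)) (N I k : Nat) (hk : k < I + 1) :
    (pvBase1 mat (N : Int) (I : Int)).getD k "" =
      PySem.List.pyGetD (PySem.List.pyGetD mat ((N : Int) - 1 - I + (k : Int)) []) (k : Int) "" := by
  unfold pvBase1
  have hb : ((I : Int) + 1) = ((I + 1 : Nat) : Int) := by norm_cast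
  rw [hb, PySem.List.pyRange_zero_nat, List.getD_eq_getElem?_getD, List.map_map,
    List.getElem?_map, List.getElem?_range hk]
  simp

lemma pv_base2_getD (mat : List (List String)) (N I k : Nat) (hI : I ≤ N) (hk : k < N - I) :
    (pvBase2 mat (N : Int) (I : Int)).getD k "" =
      PySem.List.pyGetD (PySem.List.pyGetD mat (k : Int) []) ((I : Int) + (k : Int)) "" := by
  unfold pvBase2
  have hb : ((N : Int) - I) = ((N - I : Nat) : Int) := by omega
  rw [hb, PySem.List.pyRange_zero_nat, List.getD_eq_getElem?_getD, List.map_map,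
    List.getElem?_map, List.getElem?_range hk]
  simp

lemma pv_base1_length (mat : List (List String)) (N I : Nat) :
    (pvBase1 mat (N : Int) (I : Int)).length = I + 1 := by
  unfold pvBase1
  rw [List.length_map, PySem.List.length_pyRange_one]
  omega

lemma pv_base2_length (mat : List (List String)) (N I : Nat) (hI : I ≤ N) :
    (pvBase2 mat (N : Int) (I : Int)).length = N - I := by
  unfold pvBase2
  rw [List.length_map, PySem.List.length_pyRange_one]
  omega

-- per-diagonal equality, first phase
lemma pv_phase1 (mat : List (List String)) (N I : Nat) :
    ((PySem.List.pyRange 0 (N : Int) 1).foldl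
        (fun st _ => pvStep1 mat (N : Int) (I : Int) st) ((N : Int) - 1 - I, 0, [])).2.2 =
      pvTile (pvBase1 mat (N : Int) (I : Int)) (N : Int) := by
  rw [PySem.List.pyRange_zero_nat, List.foldl_map, pv_loop1,
    pv_tile_flatten (pvBase1 mat (N : Int) (I : Int)) (I + 1) (pv_base1_length mat N I) (by omega) N]
  simp only
  congr 1
  apply List.map_congr_left
  intro j hj
  rw [pv_base1_getD mat N I (j % (I + 1)) (Nat.mod_lt _ (by omega))]

-- per-diagonal equality, second phase
lemma pv_phase2 (mat : List (List String)) (N I : Nat) (hI : I < N) :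
    ((PySem.List.pyRange 0 (N : Int) 1).foldl
        (fun st _ => pvStep2 mat (N : Int) (I : Int) st) (0, (I : Int), [])).2.2 =
      pvTile (pvBase2 mat (N : Int) (I : Int)) (N : Int) := by
  rw [PySem.List.pyRange_zero_nat, List.foldl_map, pv_loop2 mat N I hI,
    pv_tile_flatten (pvBase2 mat (N : Int) (I : Int)) (N - I) (pv_base2_length mat N I (by omega)) (by omega) N]
  simp only
  congr 1
  apply List.map_congr_left
  intro j hj
  rw [pv_base2_getD mat N I (j % (N - I)) (by omega) (Nat.mod_lt _ (by omega))]

-- ===== VERDICT (by name: the statement is the Claim_ definition above) =====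
theorem diagonalsArranging_spec : Claim_equal_diagonalsArranging := by
  intro mat _ _
  unfold Spec_diagonalsArranging diagonalsArranging diagonalsArranging_alt
  simp only [PySem.List.len_eq]
  rw [PySem.List.foldl_append_singleton_eq_map, PySem.List.foldl_append_singleton_eq_map,
    List.nil_append]
  have h1 : (PySem.List.pyRange 0 (mat.length : Int) 1).map
      (fun i => ((PySem.List.pyRange 0 (mat.length : Int) 1).foldl
        (fun st _ => pvStep1 mat (mat.length : Int) i st) ((mat.length : Int) - 1 - i, 0, [])).2.2)
      = (PySem.List.pyRange 0 (mat.length : Int) 1).map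
          (fun i => pvTile (pvBase1 mat (mat.length : Int) i) (mat.length : Int)) := by
    apply List.map_congr_left
    intro i hi
    rw [PySem.List.mem_pyRange_one] at hi
    obtain ⟨I, rfl⟩ : ∃ I : Nat, i = (I : Int) := ⟨i.toNat, by omega⟩
    exact pv_phase1 mat mat.length I
  have h2 : (PySem.List.pyRange 1 (mat.length : Int) 1).map
      (fun i => ((PySem.List.pyRange 0 (mat.length : Int) 1).foldl
        (fun st _ => pvStep2 mat (mat.length : Int) i st) (0, i, [])).2.2)
      = (PySem.List.pyRange 1 (mat.length : Int) 1).map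
          (fun i => pvTile (pvBase2 mat (mat.length : Int) i) (mat.length : Int)) := by
    apply List.map_congr_left
    intro i hi
    rw [PySem.List.mem_pyRange_one] at hi
    obtain ⟨I, rfl⟩ : ∃ I : Nat, i = (I : Int) := ⟨i.toNat, by omega⟩
    exact pv_phase2 mat mat.length I (by exact_mod_cast hi.2)
  rw [h1, h2]
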